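-- pv_equiv track=rewrite | github.com/abhibms06/exercise | Palindromic_Decomposition.py | palindromic_decomposition
-- ===== SOURCE A (Python) =====
-- def palindromic_decomposition(s):
--     arr = []
--
--     for str_length in (range(1, len(s)+1)):
--         index = 0
--         tmp = ''
--         end = str_length
--         while index < len(s):
--             str = s[index:end]
--
--             if len(tmp) > 0:
--                 tmp = tmp + '|'
--
--             if ispalindrome(str):
--                 tmp = tmp + str
--                 #index = index + str_length
--                 index = index + 1
--                 #end = end + str_length
--                 end = end + 1
--             else:
--                 tmp = tmp + s[index]
--                 index = index + 1
--                 end = end + 1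
--             str_length = str_length
--
--         arr.append(tmp)
--
--     return set(arr)
--
-- def ispalindrome(s):
--     str_length = len(s)
--     start = 0
--     end = str_length - 1
--
--     while start < end:
--         if s[start] != s[end]:
--             return False
--
--         start = start + 1
--         end = end - 1
--
--     return True
-- ===== SOURCE B (Python) =====
-- def palindromic_decomposition(s):
--     # Precompute a palindrome DP table (pal[i][j] <=> s[i:j] is a palindrome),
--     # so every window test in the decomposition pass is an O(1) lookup.
--     n = len(s)
--     pal = [[True] * (n + 1) for _ in range(n + 1)]
--     for m in range(2, n + 1):
--         for i in range(n - m + 1):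
--             pal[i][i + m] = s[i] == s[i + m - 1] and pal[i + 1][i + m - 1]
--     return {
--         '|'.join(s[i:i + L] if pal[i][min(i + L, n)] else s[i] for i in range(n))
--         for L in range(1, n + 1)
--     }
-- ===== Notes on version B (the rewrite author's own statement) =====
-- stated objective: faster
-- what changed: Replaces A's per-window two-pointer palindrome re-checks inside the scan with a precomputed O(n^2) palindrome DP table (O(1) lookups) and builds each decomposition line as a join of comprehension pieces instead of incremental string accumulation.
import Mathlib
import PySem

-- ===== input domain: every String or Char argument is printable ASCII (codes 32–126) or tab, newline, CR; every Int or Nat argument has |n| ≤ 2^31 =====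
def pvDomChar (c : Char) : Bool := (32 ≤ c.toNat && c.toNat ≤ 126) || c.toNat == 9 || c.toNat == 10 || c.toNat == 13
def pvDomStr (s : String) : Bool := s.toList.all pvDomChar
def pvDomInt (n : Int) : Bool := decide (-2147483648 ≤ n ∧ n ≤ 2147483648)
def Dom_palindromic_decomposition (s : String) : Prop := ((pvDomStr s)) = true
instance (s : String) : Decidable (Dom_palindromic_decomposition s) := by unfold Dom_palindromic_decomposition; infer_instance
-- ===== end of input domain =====

-- B replaces A's per-window two-pointer palindrome re-checks with a precomputed
-- palindrome DP table looked up in O(1), and builds each line as a join of pieces.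


-- ===== PORT A =====
-- the while loop of Python's ispalindrome (two pointers start/end);
-- s[start]/s[end] are always in range here, so pyGetD is exact
def goPalA (cs : List Char) (start e : Int) : Bool :=
  if h : start < e then
    if PySem.List.pyGetD cs start ' ' != PySem.List.pyGetD cs e ' ' then false
    else goPalA cs (start + 1) (e - 1)
  else true
termination_by (e - start).toNat
decreasing_by all_goals omega

def ispalindromeA (cs : List Char) : Bool :=
  goPalA cs 0 ((cs.length : Int) - 1)

-- the inner while loop of A (tmp accumulator; index and end move together)
def goA (cs : List Char) (tmp : List Char) (index e : Int) : List Char :=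
  if h : index < (cs.length : Int) then
    let str := PySem.List.slice cs (some index) (some e)
    let tmp1 := if 0 < tmp.length then tmp ++ ['|'] else tmp
    if ispalindromeA str then goA cs (tmp1 ++ str) (index + 1) (e + 1)
    else goA cs (tmp1 ++ [PySem.List.pyGetD cs index ' ']) (index + 1) (e + 1)
  else tmp
termination_by ((cs.length : Int) - index).toNat
decreasing_by all_goals omega

-- for str_length in range(1, len(s)+1): arr.append(tmp);  return set(arr)
def palindromic_decomposition (s : String) : List String :=
  let cs := s.toList
  PySem.Set.ofList
    ((PySem.List.pyRange 1 ((cs.length : Int) + 1) 1).map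
      (fun L => String.ofList (goA cs [] 0 L)))

-- ===== PORT B =====
-- pal[i][j] lookup (indices always in range where B reads them, so pyGetD is exact)
def palEntry (pal : List (List Bool)) (i j : Int) : Bool :=
  PySem.List.pyGetD (PySem.List.pyGetD pal i []) j true

-- the DP-table fill loops of B: pal = [[True]*(n+1) for _ in range(n+1)]; then
-- for m in range(2, n+1): for i in range(n-m+1): pal[i][i+m] = ...
def palB (cs : List Char) : List (List Bool) :=
  let n := cs.length
  (PySem.List.pyRange 2 ((n : Int) + 1) 1).foldl
    (fun pal m =>
      (PySem.List.pyRange 0 ((n : Int) - m + 1) 1).foldl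
        (fun pal i =>
          PySem.List.pySetD pal i
            (PySem.List.pySetD (PySem.List.pyGetD pal i []) (i + m)
              ((PySem.List.pyGetD cs i ' ' == PySem.List.pyGetD cs (i + m - 1) ' ')
                && palEntry pal (i + 1) (i + m - 1))))
        pal)
    ((PySem.List.pyRange 0 ((n : Int) + 1) 1).map
      (fun _ => PySem.List.pyRepeat [true] ((n : Int) + 1)))

-- one piece of the joined line: s[i:i+L] if pal[i][min(i+L, n)] else s[i]
def pieceB (cs : List Char) (pal : List (List Bool)) (L i : Int) : String :=
  if palEntry pal i (min (i + L) (cs.length : Int))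
  then String.ofList (PySem.List.slice cs (some i) (some (i + L)))
  else String.ofList [PySem.List.pyGetD cs i ' ']

def palindromic_decomposition_alt (s : String) : List String :=
  let cs := s.toList
  let pal := palB cs
  PySem.Set.ofList
    ((PySem.List.pyRange 1 ((cs.length : Int) + 1) 1).map
      (fun L =>
        PySem.Str.join "|"
          ((PySem.List.pyRange 0 (cs.length : Int) 1).map (pieceB cs pal L))))

-- ===== PRECONDITION & SPEC =====
def Spec_palindromic_decomposition (s : String) (out : List String) : Prop := out = palindromic_decomposition_alt s
instance (s : String) (out : List String) : Decidable (Spec_palindromic_decomposition s out) := by unfold Spec_palindromic_decomposition; infer_instance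

-- ===== CLAIM (what is proved, stated in full; the proofs are below) =====
def Claim_equal_palindromic_decomposition : Prop := ∀ (s : String), Dom_palindromic_decomposition s → Spec_palindromic_decomposition s (palindromic_decomposition s)

-- ===== LEMMAS AND PROOFS =====
theorem pyGetD_shift (w : List Char) (x y : Char) (s : Int) (d : Char)
    (h0 : 0 ≤ s) (hs : s < (w.length : Int)) :
    PySem.List.pyGetD (x :: w ++ [y]) (s + 1) d = PySem.List.pyGetD w s d := by
  rw [PySem.List.pyGetD_of_nonneg _ _ (by omega), PySem.List.pyGetD_of_nonneg _ _ h0]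
  have h1 : (s + 1).toNat = s.toNat + 1 := by omega
  rw [h1]
  simp only [List.cons_append, List.getD_cons_succ]
  rw [List.getD_append _ _ _ _ (by omega)]

theorem goPalA_shift_aux (w : List Char) (x y : Char) :
    ∀ (k : Nat) (s e : Int), (e - s).toNat ≤ k → 0 ≤ s → e < (w.length : Int) →
      goPalA (x :: w ++ [y]) (s + 1) (e + 1) = goPalA w s e := by
  intro k
  induction k with
  | zero =>
    intro s e hk hs he
    conv_lhs => rw [goPalA]
    conv_rhs => rw [goPalA]
    rw [dif_neg (by omega), dif_neg (by omega)]
  | succ k ih =>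
    intro s e hk hs he
    by_cases hse : s < e
    · conv_lhs => rw [goPalA]
      conv_rhs => rw [goPalA]
      rw [dif_pos (by omega : s + 1 < e + 1), dif_pos hse]
      rw [pyGetD_shift w x y s _ hs (by omega)]
      rw [pyGetD_shift w x y e _ (by omega) (by omega)]
      by_cases hne : (PySem.List.pyGetD w s ' ' != PySem.List.pyGetD w e ' ') = true
      · rw [if_pos hne, if_pos hne]
      · rw [if_neg hne, if_neg hne]
        have := ih (s + 1) (e - 1) (by omega) (by omega) (by omega)
        simpa using this
    · conv_lhs => rw [goPalA]
      conv_rhs => rw [goPalA]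
      rw [dif_neg (by omega), dif_neg hse]
theorem ispalindromeA_short (w : List Char) (h : w.length ≤ 1) : ispalindromeA w = true := by
  rw [ispalindromeA, goPalA, dif_neg (by simp; omega)]

theorem ispalindromeA_concat (w : List Char) (x y : Char) :
    ispalindromeA (x :: w ++ [y]) = ((x == y) && ispalindromeA w) := by
  rw [ispalindromeA, ispalindromeA]
  have hlen : ((x :: w ++ [y]).length : Int) - 1 = (w.length : Int) + 1 := by
    simp
  rw [hlen]
  conv_lhs => rw [goPalA]
  rw [dif_pos (by omega)]
  have h0 : PySem.List.pyGetD (x :: w ++ [y]) 0 ' ' = x := by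
    simp [PySem.List.pyGetD_zero_cons]
  have hl : PySem.List.pyGetD (x :: w ++ [y]) ((w.length : Int) + 1) ' ' = y := by
    rw [PySem.List.pyGetD_of_nonneg _ _ (by omega)]
    have : ((w.length : Int) + 1).toNat = w.length + 1 := by omega
    rw [this]
    simp only [List.cons_append, List.getD_cons_succ]
    simp [List.getD]
  rw [h0, hl]
  by_cases hxy : x = y
  · subst hxy
    simp only [bne_self_eq_false, Bool.false_eq_true, if_false, beq_self_eq_true, Bool.true_and]
    have := goPalA_shift_aux w x x ((w.length : Int) - 1 - 0).toNat 0 ((w.length : Int) - 1)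
      (by omega) (by omega) (by omega)
    simpa using this
  · have : (x != y) = true := by simp [hxy]
    rw [if_pos this]
    have : (x == y) = false := by simp [hxy]
    rw [this, Bool.false_and]
def pSpec (cs : List Char) (i j : Nat) : Bool :=
  if j ≤ i + 1 then true
  else (cs.getD i ' ' == cs.getD (j - 1) ' ') && pSpec cs (i + 1) (j - 1)
termination_by j - i
decreasing_by omega

theorem window_decomp (cs : List Char) (i j : Nat) (h2 : i + 2 ≤ j) (hj : j ≤ cs.length) :
    (cs.drop i).take (j - i)
      = cs.getD i ' ' :: ((cs.drop (i + 1)).take (j - 1 - (i + 1)) ++ [cs.getD (j - 1) ' ']) := by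
  have hi : i < cs.length := by omega
  rw [List.drop_eq_getElem_cons hi]
  have h1 : j - i = (j - i - 1) + 1 := by omega
  rw [h1, List.take_succ_cons]
  have h2' : j - i - 1 = (j - i - 2) + 1 := by omega
  rw [h2', List.take_add_one]
  have hlen : (cs.drop (i + 1)).length = cs.length - (i + 1) := by simp
  have hgetE : (cs.drop (i + 1))[j - i - 2]? = some (cs.getD (j - 1) ' ') := by
    rw [List.getElem?_drop]
    have hidx : i + 1 + (j - i - 2) = j - 1 := by omega
    rw [hidx, List.getElem?_eq_getElem (by omega)]
    rw [List.getD_eq_getElem cs ' ' (by omega : j - 1 < cs.length)]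
  rw [hgetE]
  have : cs[i] = cs.getD i ' ' := by rw [List.getD_eq_getElem cs ' ' hi]
  rw [this]
  have : j - 1 - (i + 1) = j - i - 2 := by omega
  rw [this]
  simp

theorem palEq (cs : List Char) : ∀ (k i j : Nat), j - i ≤ k → i ≤ j → j ≤ cs.length →
    ispalindromeA ((cs.drop i).take (j - i)) = pSpec cs i j := by
  intro k
  induction k with
  | zero =>
    intro i j hk hij hj
    rw [pSpec, if_pos (by omega)]
    exact ispalindromeA_short _ (by simp; omega)
  | succ k ih =>
    intro i j hk hij hj
    by_cases hshort : j ≤ i + 1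
    · rw [pSpec, if_pos hshort]
      exact ispalindromeA_short _ (by simp; omega)
    · rw [pSpec, if_neg hshort]
      rw [window_decomp cs i j (by omega) hj, ← List.cons_append]
      rw [ispalindromeA_concat]
      rw [ih (i + 1) (j - 1) (by omega) (by omega) (by omega)]
def getE (pal : List (List Bool)) (a b : Nat) : Bool := (pal.getD a []).getD b true

def Wstep (cs : List Char) (pal : List (List Bool)) (m i : Nat) : List (List Bool) :=
  pal.set i ((pal.getD i []).set (i + m)
    ((cs.getD i ' ' == cs.getD (i + m - 1) ' ') && getE pal (i + 1) (i + m - 1)))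

def tabNat (cs : List Char) : List (List Bool) :=
  (List.range (cs.length - 1)).foldl
    (fun pal k => (List.range (cs.length - (2 + k) + 1)).foldl (fun pal i => Wstep cs pal (2 + k) i) pal)
    (List.replicate (cs.length + 1) (List.replicate (cs.length + 1) true))

theorem palB_eq_tabNat (cs : List Char) : palB cs = tabNat cs := by
  rw [palB, tabNat]
  have hinit : ((PySem.List.pyRange 0 ((cs.length : Int) + 1) 1).map
      (fun _ => PySem.List.pyRepeat [true] ((cs.length : Int) + 1)))
      = List.replicate (cs.length + 1) (List.replicate (cs.length + 1) true) := by
    rw [PySem.List.pyRange_one, List.map_map, PySem.List.pyRepeat_singleton]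
    have e2 : ((cs.length : Int) + 1).toNat = cs.length + 1 := by omega
    rw [e2]
    have e1 : ((cs.length : Int) + 1 - 0).toNat = cs.length + 1 := by omega
    rw [e1]
    simp only [Function.comp_def]
    rw [List.map_const', List.length_range]
  rw [hinit, PySem.List.pyRange_one, List.foldl_map]
  have hlen : (((cs.length : Int) + 1) - 2).toNat = cs.length - 1 := by omega
  rw [hlen]
  apply PySem.List.foldl_congr_mem
  intro pal k hk
  rw [List.mem_range] at hk
  have hbound : (cs.length : Int) - (2 + (k : Int)) + 1 = ((cs.length - (2 + k) + 1 : Nat) : Int) := by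
    omega
  rw [hbound, PySem.List.pyRange_one, List.foldl_map]
  have hlen2 : (((cs.length - (2 + k) + 1 : Nat) : Int) - 0).toNat = cs.length - (2 + k) + 1 := by
    omega
  rw [hlen2]
  apply PySem.List.foldl_congr_mem
  intro pal' t ht
  rw [List.mem_range] at ht
  show PySem.List.pySetD pal' (0 + (t : Int)) _ = Wstep cs pal' (2 + k) t
  have c1 : (0 : Int) + (t : Int) = ((t : Nat) : Int) := by omega
  have c2 : ((t : Nat) : Int) + (2 + (k : Int)) = (((t + (2 + k)) : Nat) : Int) := by push_cast; ring
  have c3 : ((t : Nat) : Int) + (2 + (k : Int)) - 1 = (((t + (2 + k) - 1) : Nat) : Int) := by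
    omega
  have c4 : ((t : Nat) : Int) + 1 = (((t + 1) : Nat) : Int) := by push_cast; ring
  rw [c1, c3, c4, c2]
  rw [PySem.List.pySetD_of_nonneg _ _ (by omega), PySem.List.pyGetD_natCast,
    PySem.List.pySetD_of_nonneg _ _ (by omega), PySem.List.pyGetD_natCast,
    PySem.List.pyGetD_natCast, palEntry, PySem.List.pyGetD_natCast, PySem.List.pyGetD_natCast]
  simp only [Int.toNat_natCast]
  rw [Wstep, getE]
def TabOK (cs : List Char) (pal : List (List Bool)) (M : Nat) : Prop :=
  pal.length = cs.length + 1 ∧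
  (∀ a : Nat, a ≤ cs.length → (pal.getD a []).length = cs.length + 1) ∧
  (∀ a b : Nat, b ≤ cs.length →
    (b - a ≤ M → getE pal a b = pSpec cs a b) ∧ (M < b - a → getE pal a b = true))

theorem pSpec_short (cs : List Char) (a b : Nat) (h : b ≤ a + 1) : pSpec cs a b = true := by
  rw [pSpec, if_pos h]

theorem getD_set_self' {α : Type} (l : List α) (i : Nat) (r d : α) (h : i < l.length) :
    (l.set i r).getD i d = r := by
  rw [List.getD_eq_getElem?_getD, List.getElem?_set_self h, Option.getD_some]

theorem getD_set_ne' {α : Type} (l : List α) (i a : Nat) (r d : α) (h : i ≠ a) :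
    (l.set i r).getD a d = l.getD a d := by
  rw [List.getD_eq_getElem?_getD, List.getElem?_set_ne h, ← List.getD_eq_getElem?_getD]

theorem getE_Wstep (cs : List Char) (pal : List (List Bool)) (m i a b : Nat)
    (hi : i < pal.length) (him : i + m < (pal.getD i []).length) :
    getE (Wstep cs pal m i) a b
      = if a = i ∧ b = i + m
        then ((cs.getD i ' ' == cs.getD (i + m - 1) ' ') && getE pal (i + 1) (i + m - 1))
        else getE pal a b := by
  rw [Wstep, getE, getE]
  by_cases ha : a = i
  · subst ha
    rw [getD_set_self' _ _ _ _ (by omega)]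
    by_cases hb : b = a + m
    · subst hb
      rw [if_pos ⟨rfl, rfl⟩, getD_set_self' _ _ _ _ (by omega)]
    · rw [if_neg (by tauto), getD_set_ne' _ _ _ _ _ (by omega), getE]
  · rw [if_neg (by tauto), getD_set_ne' _ _ _ _ _ (by omega), getE]

theorem length_Wstep (cs : List Char) (pal : List (List Bool)) (m i : Nat) :
    (Wstep cs pal m i).length = pal.length := by
  rw [Wstep, List.length_set]

theorem rowlen_Wstep (cs : List Char) (pal : List (List Bool)) (m i a : Nat) :
    ((Wstep cs pal m i).getD a []).length = (pal.getD a []).length := by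
  rw [Wstep]
  by_cases ha : a = i
  · subst ha
    by_cases hi : a < pal.length
    · rw [getD_set_self' _ _ _ _ hi, List.length_set]
    · rw [List.set_eq_of_length_le (by omega)]
  · rw [getD_set_ne' _ _ _ _ _ (by omega)]

theorem inner_fold (cs : List Char) (m : Nat) (hm : 2 ≤ m) (hmn : m ≤ cs.length)
    (pal : List (List Bool)) (hok : TabOK cs pal (m - 1)) :
    ∀ T : Nat, T ≤ cs.length - m + 1 →
      (let pal' := (List.range T).foldl (fun p i => Wstep cs p m i) pal
       pal'.length = cs.length + 1 ∧
       (∀ a : Nat, a ≤ cs.length → (pal'.getD a []).length = cs.length + 1) ∧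
       (∀ a b : Nat, b ≤ cs.length →
         getE pal' a b = if a < T ∧ b = a + m then pSpec cs a b else getE pal a b)) := by
  intro T
  induction T with
  | zero =>
    intro _
    refine ⟨hok.1, hok.2.1, ?_⟩
    intro a b hb
    simp
  | succ T ih =>
    intro hT
    obtain ⟨ihl, ihr, ihe⟩ := ih (by omega)
    rw [List.range_succ, List.foldl_append, List.foldl_cons, List.foldl_nil]
    set pal' := (List.range T).foldl (fun p i => Wstep cs p m i) pal with hpal'
    refine ⟨by rw [length_Wstep, ihl], ?_, ?_⟩
    · intro a ha
      rw [rowlen_Wstep]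
      exact ihr a ha
    · intro a b hb
      rw [getE_Wstep cs pal' m T a b (by omega) (by rw [ihr T (by omega)]; omega)]
      by_cases hit : a = T ∧ b = T + m
      · rw [if_pos hit, if_pos (by omega)]
        obtain ⟨ha, hbb⟩ := hit
        subst ha hbb
        have hmid : getE pal' (a + 1) (a + m - 1) = pSpec cs (a + 1) (a + m - 1) := by
          rw [ihe (a + 1) (a + m - 1) (by omega), if_neg (by omega)]
          exact ((hok.2.2 (a + 1) (a + m - 1) (by omega)).1 (by omega))
        rw [hmid]
        conv_rhs => rw [pSpec]
        rw [if_neg (by omega)]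
      · rw [if_neg hit]
        by_cases hprev : a < T ∧ b = a + m
        · rw [ihe a b hb, if_pos hprev, if_pos (by omega)]
        · rw [ihe a b hb, if_neg hprev, if_neg (by omega)]

theorem tabNat_ok (cs : List Char) :
    ∀ C : Nat, C ≤ cs.length - 1 →
      TabOK cs ((List.range C).foldl
        (fun pal k => (List.range (cs.length - (2 + k) + 1)).foldl (fun p i => Wstep cs p (2 + k) i) pal)
        (List.replicate (cs.length + 1) (List.replicate (cs.length + 1) true))) (C + 1) := by
  intro C
  induction C with
  | zero =>
    intro _
    refine ⟨by simp [List.range_zero], ?_, ?_⟩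
    · intro a ha
      simp only [List.range_zero, List.foldl_nil]
      rw [List.getD_eq_getElem?_getD, List.getElem?_replicate, if_pos (by omega)]
      simp
    · intro a b hb
      have he : getE (List.replicate (cs.length + 1) (List.replicate (cs.length + 1) true)) a b = true := by
        rw [getE]
        have houter : (List.replicate (cs.length + 1) (List.replicate (cs.length + 1) true)).getD a []
            = if a < cs.length + 1 then List.replicate (cs.length + 1) true else [] := by
          split
          · rw [List.getD_eq_getElem?_getD, List.getElem?_replicate, if_pos (by omega),
              Option.getD_some]
          · rw [List.getD_eq_getElem?_getD, List.getElem?_replicate, if_neg (by omega)]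
            rfl
        rw [houter]
        by_cases ha : a < cs.length + 1
        · rw [if_pos ha, List.getD_eq_getElem?_getD, List.getElem?_replicate]
          by_cases hb2 : b < cs.length + 1
          · rw [if_pos hb2, Option.getD_some]
          · rw [if_neg hb2]; rfl
        · rw [if_neg ha]; rfl
      simp only [List.range_zero, List.foldl_nil]
      constructor
      · intro hba
        rw [he, pSpec_short cs a b (by omega)]
      · intro _
        exact he
  | succ C ih =>
    intro hC
    rw [List.range_succ, List.foldl_append, List.foldl_cons, List.foldl_nil]
    have hok := ih (by omega)
    have hin := inner_fold cs (2 + C) (by omega) (by omega) _ (by rw [show 2 + C - 1 = C + 1 from by omega]; exact hok)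
      (cs.length - (2 + C) + 1) (le_refl _)
    obtain ⟨hl, hr, he⟩ := hin
    refine ⟨hl, hr, ?_⟩
    intro a b hb
    constructor
    · intro hba
      rw [he a b hb]
      by_cases hgap : b - a = 2 + C ∧ a ≤ b
      · rw [if_pos (by omega)]
      · rw [if_neg (by omega)]
        exact (hok.2.2 a b hb).1 (by omega)
    · intro hgt
      rw [he a b hb, if_neg (by omega)]
      exact (hok.2.2 a b hb).2 (by omega)
theorem palB_entry (cs : List Char) (i j : Nat) (hij : i ≤ j) (hj : j ≤ cs.length) :
    palEntry (palB cs) (i : Int) (j : Int) = pSpec cs i j := by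
  rw [palB_eq_tabNat, palEntry, PySem.List.pyGetD_natCast, PySem.List.pyGetD_natCast]
  have h := (tabNat_ok cs (cs.length - 1) (le_refl _)).2.2 i j hj
  rw [tabNat]
  by_cases hn : cs.length = 0
  · have : j = 0 := by omega
    subst this
    exact (h.1 (by omega)).symm ▸ (h.1 (by omega))
  · exact h.1 (by omega)

-- A-side: spec pieces and line tail
def pieceS (cs : List Char) (L i : Nat) : List Char :=
  if pSpec cs i (min (i + L) cs.length) then (cs.drop i).take L else [cs.getD i ' ']

def restS (cs : List Char) (L i : Nat) : List Char :=
  if i < cs.length then '|' :: (pieceS cs L i ++ restS cs L (i + 1)) else []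
termination_by cs.length - i
decreasing_by omega
theorem take_window (cs : List Char) (L i : Nat) :
    (cs.drop i).take L = (cs.drop i).take (min (i + L) cs.length - i) := by
  by_cases h : i + L ≤ cs.length
  · congr 1
    omega
  · rw [min_eq_right (by omega)]
    rw [List.take_of_length_le (by simp; omega), List.take_of_length_le (by simp)]

theorem ispal_slice (cs : List Char) (L i : Nat) (hL : 1 ≤ L) (hi : i < cs.length) :
    ispalindromeA ((cs.drop i).take L) = pSpec cs i (min (i + L) cs.length) := by
  rw [take_window cs L i]
  exact palEq cs (min (i + L) cs.length - i) i (min (i + L) cs.length) (le_refl _)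
    (by omega) (by omega)

theorem goA_eq (cs : List Char) (L : Nat) (hL : 1 ≤ L) :
    ∀ (k i : Nat), cs.length - i ≤ k → ∀ tmp : List Char, tmp ≠ [] →
      goA cs tmp (i : Int) ((i : Int) + (L : Int)) = tmp ++ restS cs L i := by
  intro k
  induction k with
  | zero =>
    intro i hk tmp htmp
    rw [goA, dif_neg (by omega), restS, if_neg (by omega), List.append_nil]
  | succ k ih =>
    intro i hk tmp htmp
    by_cases hi : i < cs.length
    · rw [goA, dif_pos (by omega : (i : Int) < (cs.length : Int))]
      simp only
      rw [PySem.List.slice_natCast_add cs i L]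
      rw [ispal_slice cs L i hL hi]
      rw [if_pos (List.length_pos_of_ne_nil htmp)]
      have hc1 : (i : Int) + 1 = ((i + 1 : Nat) : Int) := by omega
      have hc2 : (i : Int) + (L : Int) + 1 = ((i + 1 : Nat) : Int) + (L : Int) := by omega
      rw [hc1, hc2]
      rw [restS, if_pos hi, pieceS]
      by_cases hp : pSpec cs i (min (i + L) cs.length) = true
      · rw [if_pos hp, if_pos hp]
        rw [ih (i + 1) (by omega) _ (by simp)]
        simp
      · rw [if_neg hp, if_neg hp]
        rw [PySem.List.pyGetD_natCast]
        rw [ih (i + 1) (by omega) _ (by simp)]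
        simp
    · rw [goA, dif_neg (by omega), restS, if_neg (by omega), List.append_nil]

theorem goA_start (cs : List Char) (L : Nat) (hL : 1 ≤ L) (h0 : 0 < cs.length) :
    goA cs [] 0 (L : Int) = pieceS cs L 0 ++ restS cs L 1 := by
  rw [goA, dif_pos (by omega : (0 : Int) < (cs.length : Int))]
  simp only
  have hsl : PySem.List.slice cs (some 0) (some (L : Int)) = (cs.drop 0).take L := by
    rw [PySem.List.slice_zero_start, PySem.List.slice_to_natCast, List.drop_zero]
  rw [hsl]
  rw [ispal_slice cs L 0 hL h0]
  rw [if_neg (by simp : ¬ 0 < ([] : List Char).length)]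
  have hc1 : (0 : Int) + 1 = ((1 : Nat) : Int) := by omega
  have hc2 : (L : Int) + 1 = ((1 : Nat) : Int) + (L : Int) := by omega
  rw [hc1, hc2, pieceS]
  have hlen : ((cs.drop 0).take L).length = min L cs.length := by simp
  by_cases hp : pSpec cs 0 (min (0 + L) cs.length) = true
  · rw [if_pos hp, if_pos hp]
    rw [goA_eq cs L hL (cs.length - 1) 1 (by omega) _ (by
      simp only [List.nil_append]
      intro hnil
      rw [hnil] at hlen
      simp at hlen
      omega)]
    simp
  · rw [if_neg hp, if_neg hp]
    rw [PySem.List.pyGetD_zero]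
    rw [goA_eq cs L hL (cs.length - 1) 1 (by omega) _ (by simp)]
    simp
theorem toList_pieceB (cs : List Char) (L i : Nat) (hL : 1 ≤ L) (hi : i < cs.length) :
    (pieceB cs (palB cs) (L : Int) (i : Int)).toList = pieceS cs L i := by
  rw [pieceB, pieceS]
  have hmin : min ((i : Int) + (L : Int)) ((cs.length : Int)) = ((min (i + L) cs.length : Nat) : Int) := by
    omega
  rw [hmin, palB_entry cs i (min (i + L) cs.length) (by omega) (by omega)]
  rw [PySem.List.slice_natCast_add cs i L, PySem.List.pyGetD_natCast]
  split
  · rw [String.toList_ofList]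
  · rw [String.toList_ofList]

theorem join_pieces (cs : List Char) (L : Nat) :
    ∀ (k i : Nat), cs.length - i ≤ k → i < cs.length →
      PySem.Chars.join ['|'] ((List.range' i (cs.length - i)).map (pieceS cs L))
        = pieceS cs L i ++ restS cs L (i + 1) := by
  intro k
  induction k with
  | zero => intro i hk hi; omega
  | succ k ih =>
    intro i hk hi
    have h1 : cs.length - i = (cs.length - i - 1) + 1 := by omega
    rw [h1, List.range'_succ, List.map_cons]
    by_cases hend : i + 1 < cs.length
    · have h2 : cs.length - i - 1 = (cs.length - i - 2) + 1 := by omega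
      rw [h2, List.range'_succ, List.map_cons]
      rw [PySem.Chars.join_cons_cons]
      have hIH := ih (i + 1) (by omega) hend
      have h3 : cs.length - (i + 1) = (cs.length - i - 2) + 1 := by omega
      rw [h3, List.range'_succ, List.map_cons] at hIH
      rw [hIH]
      conv_rhs => rw [restS, if_pos hend]
      simp
    · have h2 : cs.length - i - 1 = 0 := by omega
      rw [h2]
      simp only [List.range'_zero, List.map_nil]
      rw [PySem.Chars.join_singleton]
      conv_rhs => rw [restS, if_neg (by omega)]
      rw [List.append_nil]
theorem line_eq (cs : List Char) (L : Nat) (hL : 1 ≤ L) :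
    String.ofList (goA cs [] 0 (L : Int))
      = PySem.Str.join "|"
          ((PySem.List.pyRange 0 (cs.length : Int) 1).map (pieceB cs (palB cs) (L : Int))) := by
  have h : goA cs [] 0 (L : Int)
      = (PySem.Str.join "|"
          ((PySem.List.pyRange 0 (cs.length : Int) 1).map (pieceB cs (palB cs) (L : Int)))).toList := by
    rw [PySem.Str.toList_join, List.map_map]
    have hsep : "|".toList = ['|'] := rfl
    rw [hsep]
    rw [PySem.List.pyRange_one, List.map_map]
    have hn : ((cs.length : Int) - 0).toNat = cs.length := by omega
    rw [hn]
    have hmm : ∀ t ∈ List.range cs.length,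
        ((String.toList ∘ pieceB cs (palB cs) (L : Int)) ∘ fun (k : Nat) => 0 + (k : Int)) t
          = pieceS cs L t := by
      intro t ht
      rw [List.mem_range] at ht
      simp only [Function.comp_apply, zero_add]
      exact toList_pieceB cs L t hL ht
    rw [List.map_congr_left hmm]
    by_cases h0 : 0 < cs.length
    · rw [goA_start cs L hL h0]
      rw [List.range_eq_range']
      have : cs.length = cs.length - 0 := by omega
      rw [this]
      rw [join_pieces cs L cs.length 0 (by omega) (by omega)]
    · have hnil : cs.length = 0 := by omega
      rw [goA, dif_neg (by omega)]
      rw [hnil]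
      simp [PySem.Chars.join_nil]
  rw [h, String.ofList_toList]
theorem main_eq (s : String) : palindromic_decomposition s = palindromic_decomposition_alt s := by
  rw [palindromic_decomposition, palindromic_decomposition_alt]
  congr 1
  apply List.map_congr_left
  intro L hL
  rw [PySem.List.mem_pyRange_one] at hL
  have hLt : L = ((L.toNat : Nat) : Int) := by omega
  rw [hLt]
  exact line_eq s.toList L.toNat (by omega)

-- ===== VERDICT (by name: the statement is the Claim_ definition above) =====
theorem palindromic_decomposition_spec : Claim_equal_palindromic_decomposition := by
  intro s _
  show palindromic_decomposition s = palindromic_decomposition_alt s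
  exact main_eq s
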